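-- pv_equiv track=rewrite | github.com/unlearning/python-algorithm | ppinppini/Day1/Day9/등수매기기.py | solution
-- ===== SOURCE A (Python) =====
-- def solution(array):
--   answer=[]
--   result=[]
--   answer1=[]
--   for i in array:
--       answer.append(sum(i))
--
--
--   result=sorted(answer,reverse=True)
--   for j in answer:
--     answer1.append(result.index(j)+1)
--   return answer1
-- ===== SOURCE B (Python) =====
-- def solution(array):
--     sums = [sum(r) for r in array]
--     return [1 + sum(1 for t in sums if t > s) for s in sums]
-- ===== Notes on version B (the rewrite author's own statement) =====
-- stated objective: alternative
-- what changed: Ranks are computed directly as 1 + the number of strictly greater row sums, replacing A's sort-then-repeated-.index lookup.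
import Mathlib
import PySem

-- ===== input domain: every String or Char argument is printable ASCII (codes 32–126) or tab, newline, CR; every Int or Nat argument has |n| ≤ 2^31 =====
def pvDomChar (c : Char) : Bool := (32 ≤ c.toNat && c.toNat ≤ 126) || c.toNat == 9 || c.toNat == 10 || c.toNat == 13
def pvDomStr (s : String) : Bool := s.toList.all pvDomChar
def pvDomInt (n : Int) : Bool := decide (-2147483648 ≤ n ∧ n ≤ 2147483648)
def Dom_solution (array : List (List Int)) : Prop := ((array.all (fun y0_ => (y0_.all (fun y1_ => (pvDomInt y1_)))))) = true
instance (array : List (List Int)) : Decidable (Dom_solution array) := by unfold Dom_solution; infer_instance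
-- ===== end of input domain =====

-- B computes each rank directly as 1 + the number of strictly greater row sums (no sort, no .index).

-- ===== PORT A =====
def solution (array : List (List Int)) : List Int :=
  let answer := array.foldl (fun acc i => acc ++ [i.sum]) []
  let result := PySem.List.sorted answer (fun x => x) true
  answer.foldl (fun acc j => acc ++ [((PySem.List.index? result j).getD 0 : Int) + 1]) []

-- ===== PORT B =====
def solution_alt (array : List (List Int)) : List Int :=
  let sums := array.map (fun r => r.sum)
  sums.map (fun s => 1 + ((sums.countP (fun t => decide (t > s))) : Int))

-- ===== PRECONDITION & SPEC =====
def Spec_solution (array : List (List Int)) (out : List Int) : Prop := out = solution_alt array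
instance (array : List (List Int)) (out : List Int) : Decidable (Spec_solution array out) := by unfold Spec_solution; infer_instance

-- ===== CLAIM (what is proved, stated in full; the proofs are below) =====
def Claim_equal_solution : Prop := ∀ (array : List (List Int)), Dom_solution array → Spec_solution array (solution array)

-- ===== LEMMAS AND PROOFS =====

-- In a descending-sorted list, the first index of a member j is the number of elements strictly greater than j.
theorem idx_desc_eq_count_gt (r : List Int) (j : Int)
    (hs : r.Pairwise (fun a b => b ≤ a)) (hm : j ∈ r) :
    PySem.List.index? r j = some (r.countP (fun x => decide (j < x))) := by
  induction r with
  | nil => cases hm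
  | cons x t ih =>
    rcases List.pairwise_cons.mp hs with ⟨hx, ht⟩
    by_cases hxj : x = j
    · subst hxj
      have hcnt : t.countP (fun y => decide (x < y)) = 0 := by
        rw [List.countP_eq_zero]
        intro y hy
        simpa using not_lt.mpr (hx y hy)
      simp [hcnt, List.idxOf?_cons]
    · have hmt : j ∈ t := by
        rcases List.mem_cons.mp hm with h | h
        · exact absurd h.symm hxj
        · exact h
      have hjx : j < x := lt_of_le_of_ne (hx j hmt) (fun h => hxj h.symm)
      have hih := ih ht hmt
      simp only [PySem.List.index?_eq_idxOf?] at hih ⊢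
      simp [List.idxOf?_cons, (by simpa using hxj : (x == j) = false), hih, hjx]

theorem rank_eq (sums : List Int) (j : Int) (hm : j ∈ sums) :
    ((PySem.List.index? (PySem.List.sorted sums (fun x => x) true) j).getD 0 : Int) + 1
      = 1 + ((sums.countP (fun t => decide (t > j))) : Int) := by
  have hperm := PySem.List.sorted_perm sums (fun x => x) true
  have hpw := PySem.List.sorted_pairwise_rev sums (fun x => x)
  have hm' : j ∈ PySem.List.sorted sums (fun x => x) true := hperm.mem_iff.mpr hm
  rw [idx_desc_eq_count_gt _ j hpw hm', hperm.countP_eq]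
  have : (sums.countP (fun x => decide (j < x))) = sums.countP (fun t => decide (t > j)) := by
    apply List.countP_congr; intro x _; simp [gt_iff_lt]
  rw [this]; simp; ring

-- ===== VERDICT (by name: the statement is the Claim_ definition above) =====
theorem solution_spec : Claim_equal_solution := by
  intro array _
  unfold Spec_solution solution solution_alt
  rw [PySem.List.foldl_append_singleton_eq_map, PySem.List.foldl_append_singleton_eq_map]
  apply List.map_congr_left
  intro j hj
  exact rank_eq _ j hj
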